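-- pv_equiv track=rewrite | github.com/kornia/bubbaloop | bubbaloop-agent/src/memory.py | _count_category_entries
-- ===== SOURCE A (Python) =====
-- def _count_category_entries(text: str, category: str) -> int:
--     """Count how many entries exist in a category."""
--     category_header = f"## {category.title()}"
--     lines = text.split("\n")
--     count = 0
--     in_section = False
--     for line in lines:
--         if line.strip() == category_header:
--             in_section = True
--         elif line.startswith("## "):
--             in_section = False
--         elif in_section and line.strip().startswith("- "):
--             count += 1
--     return count
-- ===== SOURCE B (Python) =====
-- def _count_category_entries(text: str, category: str) -> int:
--     """Count how many entries exist in a category."""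
--     header = f"## {category.title()}"
--     # Phase 1: partition the lines into sections.  A section opens at every
--     # boundary line (one that strip-equals the header, or starts with "## ");
--     # its body is every following non-boundary line.
--     sections = []
--     current = None  # (is_match, body) of the open section
--     for line in text.split("\n"):
--         if line.strip() == header or line.startswith("## "):
--             if current is not None:
--                 sections.append(current)
--             current = (line.strip() == header, [])
--         elif current is not None:
--             current[1].append(line)
--     if current is not None:
--         sections.append(current)
--     # Phase 2: total the "- " entries over the matching sections.
--     total = 0
--     for is_match, body in sections:
--         if is_match:
--             for line in body:
--                 if line.strip().startswith("- "):
--                     total += 1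
--     return total
-- ===== Notes on version B (the rewrite author's own statement) =====
-- stated objective: alternative
-- what changed: Replaces the single flag-carrying loop with a two-phase decomposition: one pass partitions the lines into (is_match, body) sections at boundary lines, then a second pass sums the '- ' entries over the matching sections' bodies.
import Mathlib
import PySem

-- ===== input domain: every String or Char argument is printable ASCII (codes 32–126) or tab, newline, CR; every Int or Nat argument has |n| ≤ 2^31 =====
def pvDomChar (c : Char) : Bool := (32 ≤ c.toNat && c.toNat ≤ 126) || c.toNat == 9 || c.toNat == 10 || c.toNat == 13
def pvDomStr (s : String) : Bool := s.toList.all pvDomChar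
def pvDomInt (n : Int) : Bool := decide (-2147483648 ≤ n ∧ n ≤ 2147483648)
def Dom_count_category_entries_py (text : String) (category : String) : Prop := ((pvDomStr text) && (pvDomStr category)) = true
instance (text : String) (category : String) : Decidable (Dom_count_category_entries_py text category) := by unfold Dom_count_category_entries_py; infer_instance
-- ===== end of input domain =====

-- B partitions the lines into sections first and then sums the entries over the
-- matching sections, instead of A's single flag-carrying loop (objective: alternative).

-- ===== PORT A =====
-- str.title(), exact on ASCII: a letter is uppercased after a non-cased char,
-- lowercased otherwise (ASCII cased = alphabetic).  Shared by both ports, as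
-- both Pythons compute the header the same way.
def pvTitle : Bool → List Char → List Char
  | _, [] => []
  | prev, c :: r =>
    (if PySem.Chars.isalpha c then
       (if prev then PySem.Chars.lowerChar c else PySem.Chars.upperChar c)
     else c) :: pvTitle (PySem.Chars.isalpha c) r

def pvHeader (category : String) : List Char :=
  '#' :: '#' :: ' ' :: pvTitle false category.toList

-- one iteration of A's loop over state (count, in_section)
def pvAStep (h : List Char) (st : Int × Bool) (line : List Char) : Int × Bool :=
  if PySem.Chars.strip line = h then (st.1, true)
  else if PySem.Chars.startswith line ['#', '#', ' '] then (st.1, false)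
  else if st.2 && PySem.Chars.startswith (PySem.Chars.strip line) ['-', ' '] then
    (st.1 + 1, st.2)
  else st

def count_category_entries_py (text : String) (category : String) : Int :=
  let h := pvHeader category
  let lines := PySem.Chars.splitOn text.toList ['\n']
  (lines.foldl (pvAStep h) (0, false)).1

-- ===== PORT B =====
-- a body line counted as an entry
def pvEntry (line : List Char) : Bool :=
  PySem.Chars.startswith (PySem.Chars.strip line) ['-', ' ']

-- closing the open section, if any
def pvFlush (done : List (Bool × List (List Char)))
    (cur : Option (Bool × List (List Char))) : List (Bool × List (List Char)) :=
  match cur with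
  | none => done
  | some s => done ++ [s]

-- one iteration of B's partition loop over state (sections, current)
def pvBStep (h : List Char)
    (st : List (Bool × List (List Char)) × Option (Bool × List (List Char)))
    (line : List Char) :
    List (Bool × List (List Char)) × Option (Bool × List (List Char)) :=
  if PySem.Chars.strip line = h ∨ PySem.Chars.startswith line ['#', '#', ' '] then
    (pvFlush st.1 st.2, some (decide (PySem.Chars.strip line = h), []))
  else
    match st.2 with
    | none => st
    | some (m, b) => (st.1, some (m, b ++ [line]))

def count_category_entries_py_alt (text : String) (category : String) : Int :=
  let h := pvHeader category
  let lines := PySem.Chars.splitOn text.toList ['\n']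
  let st := lines.foldl (pvBStep h) ([], none)
  let sections := pvFlush st.1 st.2
  sections.foldl
    (fun t s =>
      if s.1 then s.2.foldl (fun t2 l => if pvEntry l then t2 + 1 else t2) t
      else t) 0

-- ===== PRECONDITION & SPEC =====
def Spec_count_category_entries_py (text : String) (category : String) (out : Int) : Prop := out = count_category_entries_py_alt text category
instance (text : String) (category : String) (out : Int) : Decidable (Spec_count_category_entries_py text category out) := by unfold Spec_count_category_entries_py; infer_instance

-- ===== CLAIM (what is proved, stated in full; the proofs are below) =====
def Claim_equal_count_category_entries_py : Prop := ∀ (text : String) (category : String), Dom_count_category_entries_py text category → Spec_count_category_entries_py text category (count_category_entries_py text category)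

-- ===== LEMMAS AND PROOFS =====

-- entry count of a body, and value of a section
def pvCnt (b : List (List Char)) : Int :=
  b.foldl (fun t l => if pvEntry l then t + 1 else t) 0

def pvSecVal (s : Bool × List (List Char)) : Int := if s.1 then pvCnt s.2 else 0

-- A's count from flag s
def pvACount (h : List Char) (s : Bool) (lines : List (List Char)) : Int :=
  (lines.foldl (pvAStep h) (0, s)).1

lemma pvCnt_from (b : List (List Char)) (t : Int) :
    b.foldl (fun t2 l => if pvEntry l then t2 + 1 else t2) t = t + pvCnt b := by
  induction b generalizing t with
  | nil => simp [pvCnt]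
  | cons l r ih =>
    simp only [List.foldl_cons, pvCnt]
    rw [ih, ih]
    split <;> omega

lemma pvTot_from (secs : List (Bool × List (List Char))) (t : Int) :
    secs.foldl
      (fun t s =>
        if s.1 then s.2.foldl (fun t2 l => if pvEntry l then t2 + 1 else t2) t
        else t) t = t + (secs.map pvSecVal).sum := by
  induction secs generalizing t with
  | nil => simp
  | cons s r ih =>
    simp only [List.foldl_cons, List.map_cons, List.sum_cons]
    rw [ih]
    by_cases hm : s.1
    · rw [if_pos hm, pvCnt_from, pvSecVal, if_pos hm]; ring
    · rw [if_neg hm, pvSecVal, if_neg hm]; ring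

def pvTot (secs : List (Bool × List (List Char))) : Int := (secs.map pvSecVal).sum

lemma pvShiftA (h : List Char) (lines : List (List Char)) (c : Int) (s : Bool) :
    (lines.foldl (pvAStep h) (c, s)).1 = c + (lines.foldl (pvAStep h) (0, s)).1 := by
  induction lines generalizing c s with
  | nil => simp
  | cons l r ih =>
    simp only [List.foldl_cons, pvAStep]
    split
    · rw [ih]
    · split
      · rw [ih]
      · split
        · rw [ih (c + 1), ih (0 + 1)]; ring
        · exact ih c s

lemma pvACount_cons (h : List Char) (s : Bool) (l : List Char) (r : List (List Char)) :
    pvACount h s (l :: r) =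
      if PySem.Chars.strip l = h then pvACount h true r
      else if PySem.Chars.startswith l ['#', '#', ' '] then pvACount h false r
      else if s && pvEntry l then 1 + pvACount h s r
      else pvACount h s r := by
  simp only [pvACount, List.foldl_cons, pvAStep, pvEntry]
  split
  · rfl
  · split
    · rfl
    · split
      · exact pvShiftA h r 1 s
      · rfl

lemma pvSomeInv (h : List Char) (lines : List (List Char))
    (done : List (Bool × List (List Char))) (m : Bool) (b : List (List Char)) :
    (let st := lines.foldl (pvBStep h) (done, some (m, b));
     pvTot (pvFlush st.1 st.2)) =
      pvTot done + pvSecVal (m, b) + pvACount h m lines := by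
  induction lines generalizing done m b with
  | nil =>
    simp [pvFlush, pvTot, pvACount]
  | cons l r ih =>
    simp only [List.foldl_cons]
    rw [pvACount_cons]
    by_cases h1 : PySem.Chars.strip l = h
    · rw [if_pos h1]
      have : pvBStep h (done, some (m, b)) l =
          (done ++ [(m, b)], some (true, [])) := by
        simp [pvBStep, pvFlush, h1]
      rw [this, ih]
      simp [pvTot, pvSecVal, pvCnt]
    · rw [if_neg h1]
      by_cases h2 : PySem.Chars.startswith l ['#', '#', ' ']
      · rw [if_pos h2]
        have : pvBStep h (done, some (m, b)) l =
            (done ++ [(m, b)], some (false, [])) := by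
          simp [pvBStep, pvFlush, h1, h2]
        rw [this, ih]
        simp [pvTot, pvSecVal, pvCnt]
      · rw [if_neg h2]
        have : pvBStep h (done, some (m, b)) l = (done, some (m, b ++ [l])) := by
          simp [pvBStep, h1, h2]
        rw [this, ih]
        have hb : pvSecVal (m, b ++ [l]) =
            pvSecVal (m, b) + (if m && pvEntry l then (1 : Int) else 0) := by
          simp only [pvSecVal]
          cases m with
          | false => simp
          | true =>
            simp only [Bool.true_and, if_true]
            simp only [pvCnt, List.foldl_append, List.foldl_cons, List.foldl_nil]
            rw [pvCnt_from]
            split <;> simp [pvCnt]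
        rw [hb]
        split <;> ring
    
lemma pvNoneInv (h : List Char) (lines : List (List Char))
    (done : List (Bool × List (List Char))) :
    (let st := lines.foldl (pvBStep h) (done, none);
     pvTot (pvFlush st.1 st.2)) = pvTot done + pvACount h false lines := by
  induction lines generalizing done with
  | nil => simp [pvFlush, pvACount]
  | cons l r ih =>
    simp only [List.foldl_cons]
    rw [pvACount_cons]
    by_cases h1 : PySem.Chars.strip l = h
    · rw [if_pos h1]
      have : pvBStep h (done, none) l = (done, some (true, [])) := by
        simp [pvBStep, pvFlush, h1]
      rw [this, pvSomeInv]
      simp [pvSecVal, pvCnt]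
    · rw [if_neg h1]
      by_cases h2 : PySem.Chars.startswith l ['#', '#', ' ']
      · rw [if_pos h2]
        have : pvBStep h (done, none) l = (done, some (false, [])) := by
          simp [pvBStep, pvFlush, h1, h2]
        rw [this, pvSomeInv]
        simp [pvSecVal]
      · rw [if_neg h2]
        have : pvBStep h (done, none) l = (done, none) := by
          simp [pvBStep, h1, h2]
        rw [this, ih]
        simp

-- ===== VERDICT (by name: the statement is the Claim_ definition above) =====
theorem count_category_entries_py_spec : Claim_equal_count_category_entries_py := by
  intro text category _
  unfold Spec_count_category_entries_py count_category_entries_py count_category_entries_py_alt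
  rw [pvTot_from]
  have := pvNoneInv (pvHeader category) (PySem.Chars.splitOn text.toList ['\n']) []
  simp only [pvTot, List.map_nil, List.sum_nil] at this ⊢
  rw [this]
  simp [pvACount]
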